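-- pv_equiv track=rewrite | github.com/jangjuseong/TIL | algorithm/programmers/lv2/스택&큐/주식가격/example.py | solution
-- ===== SOURCE A (Python) =====
-- def solution(prices):
--     # Initialize a list to store the non-falling seconds for each price
--     non_falling_seconds = [0] * len(prices)
--     # The last price will always have 0 non-falling seconds
--     non_falling_seconds[-1] = 0
--
--     # Iterate through the prices in reverse order, starting from the second last price
--     for i in range(len(prices) - 2, -1, -1):
--         if prices[i] <= prices[i + 1]:  # If the current price is less than or equal to the next price
--             # Increment non-falling seconds by 1
--             non_falling_seconds[i] = non_falling_seconds[i + 1] + 1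
--         else:
--             # Reset non-falling seconds to 0 if the price falls
--             non_falling_seconds[i] = 0
--
--     return non_falling_seconds
-- ===== SOURCE B (Python) =====
-- def chain(tail):
--     # length of the initial non-falling run of adjacent pairs
--     c = 0
--     for x, y in zip(tail, tail[1:]):
--         if x <= y:
--             c += 1
--         else:
--             break
--     return c
--
--
-- def solution(prices):
--     return [chain(prices[i:]) for i in range(len(prices))]
-- ===== Notes on version B (the rewrite author's own statement) =====
-- stated objective: alternative
-- what changed: Replaces the reverse dynamic-programming recurrence over a preallocated array with an independent forward scan per index: each entry is the length of the initial non-falling run of the suffix starting there.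
-- crash fix: On the empty list A raises IndexError (it assigns to non_falling_seconds[-1]); B returns []. — e.g. on solution([]): A raises IndexError, B returns []
import Mathlib
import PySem

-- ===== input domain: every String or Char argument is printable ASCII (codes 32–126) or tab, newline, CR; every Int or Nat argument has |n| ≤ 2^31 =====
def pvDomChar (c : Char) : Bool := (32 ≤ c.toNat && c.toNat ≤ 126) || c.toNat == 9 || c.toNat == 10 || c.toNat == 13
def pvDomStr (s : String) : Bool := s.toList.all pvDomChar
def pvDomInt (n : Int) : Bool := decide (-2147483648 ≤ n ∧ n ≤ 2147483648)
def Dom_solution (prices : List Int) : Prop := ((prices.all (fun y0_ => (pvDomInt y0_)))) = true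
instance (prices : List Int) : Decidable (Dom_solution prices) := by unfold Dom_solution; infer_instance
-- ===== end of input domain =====

-- B replaces A's reverse-DP recurrence over a preallocated array by an independent
-- forward scan per index (alternative decomposition, same return value on nonempty input).

-- ===== PORT A =====
def solution (prices : List Int) : List Int :=
  let n : Int := prices.length
  -- non_falling_seconds = [0] * len(prices)
  let arr0 : List Int := List.replicate prices.length 0
  -- non_falling_seconds[-1] = 0   (IndexError on the empty list: excluded by Pre_solution)
  let arr1 : List Int := arr0.set (prices.length - 1) 0
  -- for i in range(len(prices) - 2, -1, -1): …
  (PySem.List.pyRange (n - 2) (-1) (-1)).foldl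
    (fun arr i =>
      if PySem.List.pyGetD prices i 0 ≤ PySem.List.pyGetD prices (i + 1) 0 then
        arr.set i.toNat (PySem.List.pyGetD arr (i + 1) 0 + 1)
      else
        arr.set i.toNat 0)
    arr1

-- ===== PORT B =====
-- chain(tail): walk the adjacent pairs of the suffix, counting until a fall (the `break`)
def chainLen : List Int → Int
  | [] => 0
  | [_] => 0
  | x :: y :: rest => if x ≤ y then chainLen (y :: rest) + 1 else 0

def solution_alt (prices : List Int) : List Int :=
  (List.range prices.length).map (fun i => chainLen (prices.drop i))

-- ===== PRECONDITION & SPEC =====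
-- Pre_ excludes only the empty list, on which A raises IndexError.
def Pre_solution (prices : List Int) : Prop := prices ≠ []
instance (prices : List Int) : Decidable (Pre_solution prices) := by unfold Pre_solution; infer_instance
def pvWitness_solution : List Int := [1, 2, 3, 2]

-- On the empty list A raises IndexError (it assigns to non_falling_seconds[-1]); B returns [].
def Raises_solution (prices : List Int) : Prop := prices = []
instance (prices : List Int) : Decidable (Raises_solution prices) := by unfold Raises_solution; infer_instance
def pvRaiseWitness_solution : List Int := []
def pvRaiseWitnessOut_solution : List Int := []

def Spec_solution (prices : List Int) (out : List Int) : Prop := out = solution_alt prices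
instance (prices : List Int) (out : List Int) : Decidable (Spec_solution prices out) := by unfold Spec_solution; infer_instance

-- ===== CLAIM (what is proved, stated in full; the proofs are below) =====
def Claim_equal_solution : Prop := ∀ (prices : List Int), Dom_solution prices → Pre_solution prices → Spec_solution prices (solution prices)
def Claim_raises_solution : Prop := (∀ (prices : List Int), Dom_solution prices → Raises_solution prices → ¬ Pre_solution prices) ∧ (Dom_solution (pvRaiseWitness_solution) ∧ Raises_solution (pvRaiseWitness_solution) ∧ solution_alt (pvRaiseWitness_solution) = pvRaiseWitnessOut_solution)

-- ===== LEMMAS AND PROOFS =====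

theorem alt_length (prices : List Int) : (solution_alt prices).length = prices.length := by
  simp [solution_alt]

theorem alt_getElem (prices : List Int) (m : Nat) (h : m < prices.length) :
    (solution_alt prices)[m]'(by simp [solution_alt]; omega) = chainLen (prices.drop m) := by
  simp [solution_alt]

-- B's per-index value satisfies A's recurrence
theorem chain_step (prices : List Int) (m : Nat) (h : m + 1 < prices.length) :
    chainLen (prices.drop m) =
      if prices[m]'(by omega) ≤ prices[m+1]'h then chainLen (prices.drop (m+1)) + 1 else 0 := by
  rw [List.drop_eq_getElem_cons (show m < prices.length by omega)]
  rw [List.drop_eq_getElem_cons h]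
  rfl

-- one iteration of A's loop body, applied at index m to the invariant state
theorem g_step (prices : List Int) (m : Nat) (h : m + 1 < prices.length) :
    (if PySem.List.pyGetD prices (m : Int) 0 ≤ PySem.List.pyGetD prices ((m : Int) + 1) 0 then
        (List.replicate (m+1) 0 ++ (solution_alt prices).drop (m+1)).set (m : Int).toNat
          (PySem.List.pyGetD (List.replicate (m+1) 0 ++ (solution_alt prices).drop (m+1)) ((m : Int) + 1) 0 + 1)
      else
        (List.replicate (m+1) 0 ++ (solution_alt prices).drop (m+1)).set (m : Int).toNat 0)
    = List.replicate m 0 ++ (solution_alt prices).drop m := by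
  have hcast : (m : Int) + 1 = ((m + 1 : Nat) : Int) := by push_cast; ring
  have hmt : ((m : Int)).toNat = m := by simp
  have hp1 : PySem.List.pyGetD prices (m : Int) 0 = prices[m]'(by omega) := by
    rw [PySem.List.pyGetD_natCast, List.getD_eq_getElem _ _ (by omega)]
  have hp2 : PySem.List.pyGetD prices ((m : Int) + 1) 0 = prices[m+1]'h := by
    rw [hcast, PySem.List.pyGetD_natCast, List.getD_eq_getElem _ _ h]
  have harrlen : m + 1 < (List.replicate (m+1) (0:Int) ++ (solution_alt prices).drop (m+1)).length := by
    simp [alt_length]; omega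
  have ha2 : PySem.List.pyGetD (List.replicate (m+1) 0 ++ (solution_alt prices).drop (m+1)) ((m : Int) + 1) 0
      = chainLen (prices.drop (m+1)) := by
    rw [hcast, PySem.List.pyGetD_natCast, List.getD_eq_getElem _ _ harrlen]
    rw [List.getElem_append_right (by simp)]
    simp [alt_getElem prices (m+1) h]
  have harr : List.replicate (m+1) (0:Int) ++ (solution_alt prices).drop (m+1)
      = List.replicate m 0 ++ (0 :: (solution_alt prices).drop (m+1)) := by
    rw [List.replicate_succ']; simp
  have hset : ∀ v : Int,
      (List.replicate (m+1) (0:Int) ++ (solution_alt prices).drop (m+1)).set m v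
      = List.replicate m 0 ++ (v :: (solution_alt prices).drop (m+1)) := by
    intro v
    rw [harr, List.set_append]
    simp
  have hdrop : (solution_alt prices).drop m
      = chainLen (prices.drop m) :: (solution_alt prices).drop (m+1) := by
    rw [List.drop_eq_getElem_cons (show m < (solution_alt prices).length by rw [alt_length]; omega)]
    rw [alt_getElem prices m (by omega)]
  rw [hp1, hp2, ha2, hmt, hset, hset, hdrop, chain_step prices m h]
  split_ifs <;> rfl

-- invariant: folding A's loop from index m down to 0 completes the answer
theorem loop_invariant (prices : List Int) (m : Nat) (h : m + 1 < prices.length) :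
    (PySem.List.pyRange (m : Int) (-1) (-1)).foldl
      (fun arr i =>
        if PySem.List.pyGetD prices i 0 ≤ PySem.List.pyGetD prices (i + 1) 0 then
          arr.set i.toNat (PySem.List.pyGetD arr (i + 1) 0 + 1)
        else
          arr.set i.toNat 0)
      (List.replicate (m + 1) 0 ++ (solution_alt prices).drop (m + 1))
    = solution_alt prices := by
  induction m with
  | zero =>
    rw [show ((0:Nat):Int) = 0 by norm_num]
    rw [PySem.List.pyRange_neg_one_cons (by norm_num : (-1:Int) < 0)]
    rw [show ((0:Int) - 1) = -1 by norm_num, PySem.List.pyRange_neg_one_eq_nil le_rfl]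
    simp only [List.foldl_cons, List.foldl_nil]
    have := g_step prices 0 h
    simpa using this
  | succ k ih =>
    rw [PySem.List.pyRange_neg_one_cons (show (-1:Int) < ((k+1 : Nat) : Int) by push_cast; omega)]
    simp only [List.foldl_cons]
    rw [g_step prices (k+1) h]
    have hk : ((k + 1 : Nat) : Int) - 1 = (k : Nat) := by push_cast; ring
    rw [hk]
    exact ih (by omega)

theorem solution_eq (prices : List Int) (hp : prices ≠ []) : solution prices = solution_alt prices := by
  have hn : 1 ≤ prices.length := List.length_pos_iff.mpr hp
  unfold solution
  simp only [List.set_replicate_self]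
  by_cases h2 : prices.length = 1
  · obtain ⟨a, ha⟩ := List.length_eq_one_iff.mp h2
    subst ha
    rw [show (([a]:List Int).length : Int) - 2 = -1 by norm_num]
    rw [PySem.List.pyRange_neg_one_eq_nil (by norm_num)]
    simp [solution_alt, List.range_succ, chainLen]
  · have h2' : 2 ≤ prices.length := by omega
    have hm : (prices.length - 2) + 1 < prices.length := by omega
    have hcast : (prices.length : Int) - 2 = ((prices.length - 2 : Nat) : Int) := by omega
    have hd : (solution_alt prices).drop (prices.length - 1) = [0] := by
      rw [List.drop_eq_getElem_cons (by rw [alt_length]; omega)]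
      rw [alt_getElem prices _ (by omega)]
      rw [show (solution_alt prices).drop (prices.length - 1 + 1) = [] from
        List.drop_eq_nil_of_le (by rw [alt_length]; omega)]
      obtain ⟨a, ha⟩ := List.length_eq_one_iff.mp
        (show (prices.drop (prices.length - 1)).length = 1 by rw [List.length_drop]; omega)
      rw [ha]; rfl
    have hinit : List.replicate prices.length (0:Int)
        = List.replicate ((prices.length - 2) + 1) 0 ++ (solution_alt prices).drop ((prices.length - 2) + 1) := by
      rw [show (prices.length - 2) + 1 = prices.length - 1 from by omega, hd]
      conv_lhs => rw [show prices.length = prices.length - 1 + 1 from by omega]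
      rw [List.replicate_succ']
    rw [hcast, hinit]
    exact loop_invariant prices (prices.length - 2) hm

-- ===== VERDICT (by name: the statement is the Claim_ definition above) =====
theorem solution_spec : Claim_equal_solution :=
  fun prices _ hp => solution_eq prices hp

@[simp]
theorem solution_raises : Claim_raises_solution := by
  unfold Claim_raises_solution
  exact ⟨fun p _ hr hp => hp hr, by decide⟩
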